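-- pv_equiv track=rewrite | github.com/demisto/content | Packs/SumoLogic_Cloud_SIEM/Integrations/SumoLogicCloudSIEM/SumoLogicCloudSIEM.py | add_list_to_q
-- ===== SOURCE A (Python) =====
-- def add_to_query(q):
--     if len(q) > 0:
--         return f'{q} '  # No need for 'AND' here
--     else:
--         return q
--
-- def add_list_to_q(q, fields, args):
--     '''
--     Add arguments to querystring
--     '''
--     for arg_field in fields:
--         arg_value = args.get(arg_field, None)
--         if arg_value:
--             if ',' in arg_value:
--                 quoted_values = [f'"{v}"' for v in arg_value.split(',')]
--                 q = add_to_query(q) + '{}:in({})'.format(arg_field, ','.join(quoted_values))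
--             else:
--                 q = add_to_query(q) + f'{arg_field}:"{arg_value}"'
--     return q
-- ===== SOURCE B (Python) =====
-- def add_list_to_q(q, fields, args):
--     '''
--     Add arguments to querystring
--     '''
--     tail = ''
--     for arg_field in reversed(fields):
--         arg_value = args.get(arg_field)
--         if arg_value:
--             if ',' in arg_value:
--                 frag = '{}:in({})'.format(arg_field, ','.join(f'"{v}"' for v in arg_value.split(',')))
--             else:
--                 frag = f'{arg_field}:"{arg_value}"'
--             tail = frag + ' ' + tail if tail else frag
--     return q + ' ' + tail if (q and tail) else q + tail
-- ===== Notes on version B (the rewrite author's own statement) =====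
-- stated objective: alternative
-- what changed: Replaces A's forward accumulation into a mutable q with a conditional space-prefix helper by building the query suffix back-to-front (a right fold over reversed(fields) that glues each fragment in front of the suffix), then attaching the starting q with one smart space-join.
import Mathlib
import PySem

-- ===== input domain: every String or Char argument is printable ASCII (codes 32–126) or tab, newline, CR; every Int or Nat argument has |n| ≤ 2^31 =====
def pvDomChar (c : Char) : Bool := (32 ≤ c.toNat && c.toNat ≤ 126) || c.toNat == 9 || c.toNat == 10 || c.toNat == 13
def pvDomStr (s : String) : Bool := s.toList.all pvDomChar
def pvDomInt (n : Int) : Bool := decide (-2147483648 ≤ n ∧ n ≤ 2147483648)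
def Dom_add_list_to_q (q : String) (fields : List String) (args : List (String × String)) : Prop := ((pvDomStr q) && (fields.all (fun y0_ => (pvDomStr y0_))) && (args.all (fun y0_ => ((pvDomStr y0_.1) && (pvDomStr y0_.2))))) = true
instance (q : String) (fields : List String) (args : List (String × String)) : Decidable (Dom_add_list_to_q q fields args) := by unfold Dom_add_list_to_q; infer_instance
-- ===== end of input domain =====

-- B replaces A's iterative forward accumulation (mutable q with a conditional
-- space-prefix each iteration) by a right fold over the reversed field
-- list that builds the query suffix back-to-front, then glues q on with one smart space-join
-- (objective: alternative decomposition, same cost).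

-- ===== PORT A =====
-- args.get(k, None): first-match lookup on the association list (type convention for dict)
def pvGet? (args : List (String × String)) (k : String) : Option String :=
  (args.find? (fun p => p.1 == k)).map (·.2)

def add_to_query (q : String) : String :=
  if PySem.Str.len q > 0 then q ++ " " else q

-- one iteration of A's loop body
def pvStepA (args : List (String × String)) (q : String) (arg_field : String) : String :=
  match pvGet? args arg_field with
  | none => q
  | some arg_value =>
    if arg_value == "" then q        -- `if arg_value:` — None or '' is falsy
    else if PySem.Str.isIn "," arg_value then
      let quoted_values := ((PySem.Str.split? arg_value ",").getD []).map (fun v => "\"" ++ v ++ "\"")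
      add_to_query q ++ (arg_field ++ ":in(" ++ PySem.Str.join "," quoted_values ++ ")")
    else
      add_to_query q ++ (arg_field ++ ":\"" ++ arg_value ++ "\"")

def add_list_to_q (q : String) (fields : List String) (args : List (String × String)) : String :=
  fields.foldl (pvStepA args) q

-- ===== PORT B =====
def pvFragment (arg_field : String) (arg_value : String) : String :=
  if PySem.Str.isIn "," arg_value then
    arg_field ++ ":in(" ++ PySem.Str.join "," (((PySem.Str.split? arg_value ",").getD []).map (fun v => "\"" ++ v ++ "\"")) ++ ")"
  else
    arg_field ++ ":\"" ++ arg_value ++ "\""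

-- B's reversed loop (`for arg_field in reversed(fields): tail = step ...`) is the right fold
-- below: structural recursion building the suffix string back-to-front
def pvRender (args : List (String × String)) : List String → String
  | [] => ""
  | f :: fs =>
    let rest := pvRender args fs
    match pvGet? args f with
    | none => rest
    | some arg_value =>
      if arg_value == "" then rest
      else if rest == "" then pvFragment f arg_value
      else pvFragment f arg_value ++ " " ++ rest

def add_list_to_q_alt (q : String) (fields : List String) (args : List (String × String)) : String :=
  let tail := pvRender args fields
  if q != "" && tail != "" then q ++ " " ++ tail else q ++ tail

-- ===== PRECONDITION & SPEC =====
def Spec_add_list_to_q (q : String) (fields : List String) (args : List (String × String)) (out : String) : Prop := out = add_list_to_q_alt q fields args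
instance (q : String) (fields : List String) (args : List (String × String)) (out : String) : Decidable (Spec_add_list_to_q q fields args out) := by unfold Spec_add_list_to_q; infer_instance

-- ===== CLAIM (what is proved, stated in full; the proofs are below) =====
def Claim_equal_add_list_to_q : Prop := ∀ (q : String) (fields : List String) (args : List (String × String)), Dom_add_list_to_q q fields args → Spec_add_list_to_q q fields args (add_list_to_q q fields args)

-- ===== LEMMAS AND PROOFS =====

-- the per-field contribution, as a (possibly empty) list of fragments
def pvG (args : List (String × String)) (f : String) : List String :=
  match pvGet? args f with
  | none => []
  | some v => if v == "" then [] else [pvFragment f v]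

theorem pvStepA_none (args : List (String × String)) (q f : String)
    (hv : pvGet? args f = none) : pvStepA args q f = q := by
  simp [pvStepA, hv]

theorem pvStepA_empty (args : List (String × String)) (q f v : String)
    (hv : pvGet? args f = some v) (h0 : v = "") : pvStepA args q f = q := by
  simp [pvStepA, hv, h0]

theorem pvStepA_some (args : List (String × String)) (q f v : String)
    (hv : pvGet? args f = some v) (h0 : v ≠ "") :
    pvStepA args q f = add_to_query q ++ pvFragment f v := by
  simp only [pvStepA, hv, pvFragment, beq_iff_eq, if_neg h0]
  split <;> rfl

theorem pvJoin_glue (sep a b : List Char) (rest : List (List Char)) :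
    PySem.Chars.join sep ((a ++ sep ++ b) :: rest) = a ++ sep ++ PySem.Chars.join sep (b :: rest) := by
  cases rest with
  | nil => simp [PySem.Chars.join_singleton, List.append_assoc]
  | cons r rs =>
      rw [PySem.Chars.join_cons_cons, PySem.Chars.join_cons_cons]
      simp [List.append_assoc]

theorem pvFragment_ne_empty (f v : String) : (pvFragment f v).toList ≠ [] := by
  unfold pvFragment
  split <;> simp [String.toList_append]

-- A's loop, characterised as one join over the starting query and the fragments
theorem pvLoopA (args : List (String × String)) (fields : List String) :
    ∀ q : String,
    (fields.foldl (pvStepA args) q).toList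
    = PySem.Chars.join [' ']
        (((if q == "" then ([] : List String) else [q]) ++ fields.flatMap (pvG args)).map String.toList) := by
  induction fields with
  | nil =>
      intro q
      by_cases hq : q = ""
      · simp [hq, PySem.Chars.join_nil]
      · simp [hq, PySem.Chars.join_singleton]
  | cons f fs ih =>
      intro q
      simp only [List.foldl_cons, List.flatMap_cons]
      cases hv : pvGet? args f with
      | none => rw [pvStepA_none args q f hv, ih q]; simp [pvG, hv]
      | some v =>
          by_cases h0 : v = ""
          · rw [pvStepA_empty args q f v hv h0, ih q]; simp [pvG, hv, h0]
          · rw [pvStepA_some args q f v hv h0, ih (add_to_query q ++ pvFragment f v)]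
            have hq' : ¬ ((add_to_query q ++ pvFragment f v == "") = true) := by
              simp only [beq_iff_eq]
              intro h
              have h2 := congrArg String.toList h
              rw [String.toList_append] at h2
              exact pvFragment_ne_empty f v (List.eq_nil_of_append_eq_nil h2).2
            rw [if_neg hq']
            by_cases hq : q = ""
            · subst hq
              have hatq : add_to_query "" = "" := by
                simp [add_to_query, PySem.Str.len_eq]
              simp [pvG, hv, h0, hatq]
            · have hne : q.toList ≠ [] := fun h => hq (String.toList_inj.mp (by simp [h]))
              have hlen : PySem.Str.len q > 0 := by
                rw [PySem.Str.len_eq]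
                exact_mod_cast List.length_pos_of_ne_nil hne
              have hatq : add_to_query q = q ++ " " := by
                unfold add_to_query; rw [if_pos hlen]
              simp only [pvG, hv, beq_iff_eq, if_neg h0, if_neg hq, List.cons_append,
                List.nil_append, List.map_cons]
              rw [show (add_to_query q ++ pvFragment f v).toList
                    = q.toList ++ [' '] ++ (pvFragment f v).toList from by
                rw [hatq, String.toList_append, String.toList_append]; rfl
                ]
              rw [pvJoin_glue]
              cases hrest : (fs.flatMap (pvG args)).map String.toList with
              | nil =>
                  simp [PySem.Chars.join_cons_cons, PySem.Chars.join_singleton]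
              | cons r rs =>
                  simp [PySem.Chars.join_cons_cons, List.append_assoc]

-- a space-join over nonempty strings is empty iff the list is empty
theorem pvJoin_eq_nil (l : List String) (h : ∀ s ∈ l, s.toList ≠ []) :
    PySem.Chars.join [' '] (l.map String.toList) = [] ↔ l = [] := by
  cases l with
  | nil => simp [PySem.Chars.join_nil]
  | cons a rs =>
      cases rs with
      | nil =>
          simp only [List.map_cons, List.map_nil, PySem.Chars.join_singleton]
          simp [h a (by simp)]
      | cons b rs' =>
          rw [List.map_cons, List.map_cons, PySem.Chars.join_cons_cons]
          constructor
          · intro hh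
            exact absurd (List.eq_nil_of_append_eq_nil (List.eq_nil_of_append_eq_nil hh).1).1
              (h a (by simp))
          · intro hh; cases hh

theorem pvG_mem_ne_nil (args : List (String × String)) (fields : List String) :
    ∀ s ∈ fields.flatMap (pvG args), s.toList ≠ [] := by
  intro s hs
  obtain ⟨f, _, hsf⟩ := List.mem_flatMap.mp hs
  unfold pvG at hsf
  rcases hv : pvGet? args f with _ | v <;> rw [hv] at hsf
  · cases hsf
  · by_cases h0 : v = ""
    · simp [h0] at hsf
    · simp only [beq_iff_eq, if_neg h0, List.mem_singleton] at hsf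
      exact hsf ▸ pvFragment_ne_empty f v

-- B's recursion, characterised as the same join over the fragments
theorem pvRenderEq (args : List (String × String)) (fields : List String) :
    (pvRender args fields).toList
    = PySem.Chars.join [' '] ((fields.flatMap (pvG args)).map String.toList) := by
  induction fields with
  | nil => simp [pvRender, PySem.Chars.join_nil]
  | cons f fs ih =>
      simp only [List.flatMap_cons]
      cases hv : pvGet? args f with
      | none =>
          rw [show pvRender args (f :: fs) = pvRender args fs by simp [pvRender, hv], ih]
          simp [pvG, hv]
      | some v =>
          by_cases h0 : v = ""
          · rw [show pvRender args (f :: fs) = pvRender args fs by simp [pvRender, hv, h0], ih]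
            simp [pvG, hv, h0]
          · have hGf : pvG args f = [pvFragment f v] := by simp [pvG, hv, h0]
            by_cases hr : pvRender args fs = ""
            · have hnil : fs.flatMap (pvG args) = [] := by
                have := ih
                rw [hr] at this
                exact (pvJoin_eq_nil _ (pvG_mem_ne_nil args fs)).mp this.symm
              rw [show pvRender args (f :: fs) = pvFragment f v by
                simp [pvRender, hv, h0, hr]]
              simp [hGf, hnil, PySem.Chars.join_singleton]
            · have hnil : fs.flatMap (pvG args) ≠ [] := by
                intro hcon
                apply hr
                apply String.toList_inj.mp
                rw [ih, hcon]
                simp [PySem.Chars.join_nil]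
              rw [show pvRender args (f :: fs) = pvFragment f v ++ " " ++ pvRender args fs by
                simp [pvRender, hv, h0, hr]]
              rcases hL : fs.flatMap (pvG args) with _ | ⟨b, bs⟩
              · exact absurd hL hnil
              · rw [hGf]
                simp only [List.cons_append, List.nil_append, List.map_cons,
                  PySem.Chars.join_cons_cons]
                rw [String.toList_append, String.toList_append, ih, hL]
                simp [List.append_assoc]

-- ===== VERDICT (by name: the statement is the Claim_ definition above) =====
theorem add_list_to_q_spec : Claim_equal_add_list_to_q := by
  intro q fields args _
  unfold Spec_add_list_to_q add_list_to_q add_list_to_q_alt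
  apply String.toList_inj.mp
  rw [pvLoopA args fields q]
  by_cases hq : q = ""
  · subst hq
    simp [pvRenderEq]
  · by_cases ht : pvRender args fields = ""
    · have hnil : fields.flatMap (pvG args) = [] := by
        have h := pvRenderEq args fields
        rw [ht] at h
        exact (pvJoin_eq_nil _ (pvG_mem_ne_nil args fields)).mp h.symm
      simp [hq, ht, hnil, PySem.Chars.join_singleton]
    · have hcond : (q != "" && pvRender args fields != "") = true := by
        rw [Bool.and_eq_true, bne_iff_ne, bne_iff_ne]; exact ⟨hq, ht⟩
      show PySem.Chars.join [' '] _
        = (if (q != "" && pvRender args fields != "") = true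
           then q ++ " " ++ pvRender args fields else q ++ pvRender args fields).toList
      rw [if_pos hcond, String.toList_append, String.toList_append, pvRenderEq]
      rcases hL : fields.flatMap (pvG args) with _ | ⟨b, bs⟩
      · exact absurd (String.toList_inj.mp (by rw [pvRenderEq, hL]; simp [PySem.Chars.join_nil])) ht
      · simp only [beq_iff_eq, if_neg hq, List.cons_append, List.nil_append, List.map_cons,
          PySem.Chars.join_cons_cons]
        simp
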